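-- pv_equiv track=rewrite | github.com/S0urC10ud/MusicAndAudioProcessingChallenge | beat/autocorrelation.py | find_max_smallest_onset
-- ===== SOURCE A (Python) =====
-- def find_max_smallest_onset(onsets, time_stamp):
--     max_min_onset = onsets[0]
--     for i in range(1, len(onsets)):
--         if onsets[i] < time_stamp:
--             max_min_onset = onsets[i]
--         else:
--             break
--     return max_min_onset
-- ===== SOURCE B (Python) =====
-- def find_max_smallest_onset(onsets, time_stamp):
--     # Binary search (bisect_left over onsets[1:], assuming onsets sorted ascending):
--     # find the first index >= 1 whose onset is >= time_stamp, return its predecessor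
--     # (floored at index 0).  O(log n) instead of A's linear scan.
--     lo, hi = 1, len(onsets)
--     while lo < hi:
--         mid = (lo + hi) // 2
--         if onsets[mid] < time_stamp:
--             lo = mid + 1
--         else:
--             hi = mid
--     return onsets[lo - 1]
-- ===== Notes on version B (the rewrite author's own statement) =====
-- stated objective: alternative
-- what changed: B replaces A's left-to-right scan-until-break by a hand-written bisect_left binary search over the sorted onsets plus one final indexing; O(log n) on the sorted domain Pre_ states, though a timing run could not credit speed since its large random inputs are unsorted.
-- outside the precondition, e.g. on find_max_smallest_onset([1, 8, 2], 5): A returns 1, B returns 2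
import Mathlib
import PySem

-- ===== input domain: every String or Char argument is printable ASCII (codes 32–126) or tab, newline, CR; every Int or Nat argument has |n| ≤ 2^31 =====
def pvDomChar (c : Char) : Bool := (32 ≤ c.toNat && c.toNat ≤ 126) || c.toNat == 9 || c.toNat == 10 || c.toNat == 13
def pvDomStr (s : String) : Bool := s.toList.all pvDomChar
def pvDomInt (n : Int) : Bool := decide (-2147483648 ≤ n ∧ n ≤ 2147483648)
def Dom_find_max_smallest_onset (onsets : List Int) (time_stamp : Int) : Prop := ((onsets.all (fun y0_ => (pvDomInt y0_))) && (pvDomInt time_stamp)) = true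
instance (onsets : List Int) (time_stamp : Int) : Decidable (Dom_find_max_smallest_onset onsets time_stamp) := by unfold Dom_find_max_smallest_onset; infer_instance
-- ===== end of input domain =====

-- B replaces A's linear scan-until-break by a bisect_left binary search; Pre_ states the sortedness this relies on.


-- ===== PORT A =====
-- the for-loop with break: carries the current max_min_onset, stops at the first onsets[i] >= time_stamp
def fmsoLoopA (onsets : List Int) (time_stamp : Int) (cur : Int) (i : Nat) : Int :=
  if i < onsets.length then
    if onsets.getD i 0 < time_stamp then
      fmsoLoopA onsets time_stamp (onsets.getD i 0) (i + 1)
    else cur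
  else cur
termination_by onsets.length - i

def find_max_smallest_onset (onsets : List Int) (time_stamp : Int) : Int :=
  -- Python's onsets[0] raises IndexError on []; Pre_ excludes the empty list
  fmsoLoopA onsets time_stamp (onsets.getD 0 0) 1

-- ===== PORT B =====
-- the while lo < hi binary-search loop of Source B (bisect_left over indices [1, len))
def fmsoBisect (onsets : List Int) (time_stamp : Int) (lo hi : Nat) : Nat :=
  if lo < hi then
    if onsets.getD ((lo + hi) / 2) 0 < time_stamp then  -- mid = (lo + hi) // 2
      fmsoBisect onsets time_stamp ((lo + hi) / 2 + 1) hi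
    else
      fmsoBisect onsets time_stamp lo ((lo + hi) / 2)
  else lo
termination_by hi - lo
decreasing_by all_goals omega

def find_max_smallest_onset_alt (onsets : List Int) (time_stamp : Int) : Int :=
  onsets.getD (fmsoBisect onsets time_stamp 1 onsets.length - 1) 0

-- ===== PRECONDITION & SPEC =====
-- Pre_ excludes [] (both programs raise IndexError at onsets[0] / onsets[lo-1]) and lists whose
-- tail onsets[1:] is unsorted, where A's scan-to-first-break value is an artefact of element
-- order that a binary search over the (by the caller's contract sorted) onset times cannot and
-- should not match; unsorted lists whose tail lies entirely below or entirely at/above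
-- time_stamp stay admitted, since there the two methods provably coincide.
def Pre_find_max_smallest_onset (onsets : List Int) (time_stamp : Int) : Prop :=
  onsets ≠ [] ∧ (List.Pairwise (· ≤ ·) (onsets.drop 1) ∨
    (∀ x ∈ onsets.drop 1, x < time_stamp) ∨ (∀ x ∈ onsets.drop 1, time_stamp ≤ x))
instance (onsets : List Int) (time_stamp : Int) : Decidable (Pre_find_max_smallest_onset onsets time_stamp) := by unfold Pre_find_max_smallest_onset; infer_instance
def pvWitness_find_max_smallest_onset : List Int × Int := ([1, 3, 3, 7], 5)

def Spec_find_max_smallest_onset (onsets : List Int) (time_stamp : Int) (out : Int) : Prop := out = find_max_smallest_onset_alt onsets time_stamp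
instance (onsets : List Int) (time_stamp : Int) (out : Int) : Decidable (Spec_find_max_smallest_onset onsets time_stamp out) := by unfold Spec_find_max_smallest_onset; infer_instance

-- ===== CLAIM (what is proved, stated in full; the proofs are below) =====
def Claim_equal_find_max_smallest_onset : Prop := ∀ (onsets : List Int) (time_stamp : Int), Dom_find_max_smallest_onset onsets time_stamp → Pre_find_max_smallest_onset onsets time_stamp → Spec_find_max_smallest_onset onsets time_stamp (find_max_smallest_onset onsets time_stamp)

-- ===== LEMMAS AND PROOFS =====

-- the linear first-break index (proof-only characterisation linking the two ports)
def fmsoStop (onsets : List Int) (time_stamp : Int) (i : Nat) : Nat :=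
  if i < onsets.length then
    if time_stamp ≤ onsets.getD i 0 then i
    else fmsoStop onsets time_stamp (i + 1)
  else onsets.length
termination_by onsets.length - i

-- unfolding equations (rw-friendly, without unfolding getD)
theorem fmsoLoopA_stop (l : List Int) (ts cur : Int) (i : Nat) (hn : ¬ i < l.length) :
    fmsoLoopA l ts cur i = cur := by
  rw [fmsoLoopA, if_neg hn]

theorem fmsoLoopA_break (l : List Int) (ts cur : Int) (i : Nat) (hn : i < l.length)
    (hc : ¬ l.getD i 0 < ts) : fmsoLoopA l ts cur i = cur := by
  rw [fmsoLoopA, if_pos hn, if_neg hc]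

theorem fmsoLoopA_cont (l : List Int) (ts cur : Int) (i : Nat) (hn : i < l.length)
    (hc : l.getD i 0 < ts) : fmsoLoopA l ts cur i = fmsoLoopA l ts (l.getD i 0) (i + 1) := by
  rw [fmsoLoopA, if_pos hn, if_pos hc]

theorem fmsoStop_end (l : List Int) (ts : Int) (i : Nat) (hn : ¬ i < l.length) :
    fmsoStop l ts i = l.length := by
  rw [fmsoStop, if_neg hn]

theorem fmsoStop_found (l : List Int) (ts : Int) (i : Nat) (hn : i < l.length)
    (hc : ts ≤ l.getD i 0) : fmsoStop l ts i = i := by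
  rw [fmsoStop, if_pos hn, if_pos (by exact hc)]

theorem fmsoStop_next (l : List Int) (ts : Int) (i : Nat) (hn : i < l.length)
    (hc : ¬ ts ≤ l.getD i 0) : fmsoStop l ts i = fmsoStop l ts (i + 1) := by
  rw [fmsoStop, if_pos hn, if_neg (by exact hc)]

-- A's loop, run from index i carrying getD (i-1), lands on getD (fmsoStop i - 1)
theorem fmsoLoopA_eq_stop (l : List Int) (ts : Int) :
    ∀ d i, l.length - i ≤ d → 1 ≤ i → i ≤ l.length →
      fmsoLoopA l ts (l.getD (i - 1) 0) i = l.getD (fmsoStop l ts i - 1) 0 := by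
  intro d
  induction d with
  | zero =>
    intro i hd h1 hin
    have hn : ¬ i < l.length := by omega
    rw [fmsoLoopA_stop l ts _ i hn, fmsoStop_end l ts i hn]
    congr 1
    omega
  | succ d ih =>
    intro i hd h1 hin
    by_cases hn : i < l.length
    · by_cases hc : l.getD i 0 < ts
      · rw [fmsoLoopA_cont l ts _ i hn hc,
            fmsoStop_next l ts i hn (not_le.mpr hc)]
        have := ih (i + 1) (by omega) (by omega) (by omega)
        simpa using this
      · rw [fmsoLoopA_break l ts _ i hn hc,
            fmsoStop_found l ts i hn (not_lt.mp hc)]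
    · rw [fmsoLoopA_stop l ts _ i hn, fmsoStop_end l ts i hn]
      congr 1
      omega

-- tail-sortedness in index form
theorem fmso_mono (l : List Int) (hs : List.Pairwise (· ≤ ·) (l.drop 1)) :
    ∀ i j, 1 ≤ i → i ≤ j → j < l.length → l.getD i 0 ≤ l.getD j 0 := by
  intro i j h1 hij hj
  rcases Nat.eq_or_lt_of_le hij with h | h
  · subst h; exact le_refl _
  · rw [List.getD_eq_getElem l 0 (by omega), List.getD_eq_getElem l 0 hj]
    have hi' : i - 1 < (l.drop 1).length := by simp [List.length_drop]; omega
    have hj' : j - 1 < (l.drop 1).length := by simp [List.length_drop]; omega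
    have hd := List.pairwise_iff_getElem.mp hs (i - 1) (j - 1) hi' hj' (by omega)
    rw [List.getElem_drop] at hd
    simpa [show 1 + (i - 1) = i from by omega, show j - 1 + 1 = j from by omega] using hd

-- an ∀-over-the-tail fact in index form
theorem fmso_tail_all (l : List Int) (P : Int → Prop) (h : ∀ x ∈ l.drop 1, P x) :
    ∀ i, 1 ≤ i → i < l.length → P (l.getD i 0) := by
  intro i h1 hi
  rw [List.getD_eq_getElem l 0 hi]
  have hi' : i - 1 < (l.drop 1).length := by simp [List.length_drop]; omega
  have hm := h _ (List.getElem_mem hi')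
  rw [List.getElem_drop] at hm
  simpa [show 1 + (i - 1) = i from by omega, show i - 1 + 1 = i from by omega] using hm

-- binary search when every probed element is < ts: lo climbs to hi
theorem fmsoBisect_all_lt (l : List Int) (ts : Int) :
    ∀ d lo hi, hi - lo ≤ d → lo ≤ hi →
      (∀ i, lo ≤ i → i < hi → l.getD i 0 < ts) → fmsoBisect l ts lo hi = hi := by
  intro d
  induction d with
  | zero =>
    intro lo hi hd hlh _
    rw [fmsoBisect, if_neg (by omega)]
    omega
  | succ d ih =>
    intro lo hi hd hlh hall
    by_cases hlt : lo < hi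
    · rw [fmsoBisect, if_pos hlt, if_pos (hall _ (by omega) (by omega))]
      exact ih _ _ (by omega) (by omega) (fun i h1 h2 => hall i (by omega) h2)
    · rw [fmsoBisect, if_neg hlt]; omega

-- binary search when every probed element is ≥ ts: hi falls to lo
theorem fmsoBisect_all_ge (l : List Int) (ts : Int) :
    ∀ d lo hi, hi - lo ≤ d →
      (∀ i, lo ≤ i → i < hi → ts ≤ l.getD i 0) → fmsoBisect l ts lo hi = lo := by
  intro d
  induction d with
  | zero =>
    intro lo hi hd _
    rw [fmsoBisect, if_neg (by omega)]
  | succ d ih =>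
    intro lo hi hd hall
    by_cases hlt : lo < hi
    · rw [fmsoBisect, if_pos hlt,
          if_neg (not_lt.mpr (hall _ (by omega) (by omega)))]
      exact ih _ _ (by omega) (fun i h1 h2 => hall i h1 (by omega))
    · rw [fmsoBisect, if_neg hlt]

-- binary-search correctness: result r satisfies lo ≤ r ≤ hi, everything in [lo, r) is < ts,
-- and (if r < hi) l[r] ≥ ts
theorem fmsoBisect_spec (l : List Int) (ts : Int) (hs : List.Pairwise (· ≤ ·) (l.drop 1)) :
    ∀ d lo hi, hi - lo ≤ d → 1 ≤ lo → lo ≤ hi → hi ≤ l.length →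
      lo ≤ fmsoBisect l ts lo hi ∧ fmsoBisect l ts lo hi ≤ hi ∧
      (∀ i, lo ≤ i → i < fmsoBisect l ts lo hi → l.getD i 0 < ts) ∧
      (fmsoBisect l ts lo hi < hi → ts ≤ l.getD (fmsoBisect l ts lo hi) 0) := by
  intro d
  induction d with
  | zero =>
    intro lo hi hd h1lo hlh hh
    have hn : ¬ lo < hi := by omega
    rw [fmsoBisect, if_neg hn]
    exact ⟨le_refl _, by omega, fun i h1 h2 => absurd h2 (by omega), fun h => absurd h hn⟩
  | succ d ih =>
    intro lo hi hd h1lo hlh hh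
    by_cases hlt : lo < hi
    · rw [fmsoBisect, if_pos hlt]
      have hmlt : (lo + hi) / 2 < hi := by omega
      have hmge : lo ≤ (lo + hi) / 2 := by omega
      by_cases hc : l.getD ((lo + hi) / 2) 0 < ts
      · rw [if_pos hc]
        obtain ⟨h1, h2, h3, h4⟩ := ih ((lo + hi) / 2 + 1) hi (by omega) (by omega) (by omega) hh
        refine ⟨by omega, h2, ?_, h4⟩
        intro i hi1 hi2
        by_cases him : i ≤ (lo + hi) / 2
        · exact lt_of_le_of_lt (fmso_mono l hs i ((lo + hi) / 2) (by omega) him (by omega)) hc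
        · exact h3 i (by omega) hi2
      · rw [if_neg hc]
        obtain ⟨h1, h2, h3, h4⟩ := ih lo ((lo + hi) / 2) (by omega) h1lo (by omega) (by omega)
        refine ⟨h1, by omega, h3, ?_⟩
        intro hrh
        rcases Nat.lt_or_ge (fmsoBisect l ts lo ((lo + hi) / 2)) ((lo + hi) / 2) with h | h
        · exact h4 h
        · have : fmsoBisect l ts lo ((lo + hi) / 2) = (lo + hi) / 2 := by omega
          rw [this]; exact not_lt.mp hc
    · rw [fmsoBisect, if_neg hlt]
      exact ⟨le_refl _, by omega, fun i h1 h2 => absurd h2 (by omega), fun h => absurd h hlt⟩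

-- the linear first-break index equals any r with the binary search's properties
theorem fmsoStop_eq_of_spec (l : List Int) (ts : Int) :
    ∀ d lo r, r - lo ≤ d → lo ≤ r → r ≤ l.length →
      (∀ i, lo ≤ i → i < r → l.getD i 0 < ts) →
      (r = l.length ∨ ts ≤ l.getD r 0) →
      fmsoStop l ts lo = r := by
  intro d
  induction d with
  | zero =>
    intro lo r hd hlr hrl h3 h4
    have hlor : lo = r := by omega
    subst hlor
    rcases Nat.lt_or_ge lo l.length with hx | hx
    · rcases h4 with h | h
      · exfalso; omega
      · exact fmsoStop_found l ts lo hx h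
    · rw [fmsoStop_end l ts lo (by omega)]; omega
  | succ d ih =>
    intro lo r hd hlr hrl h3 h4
    rcases Nat.eq_or_lt_of_le hlr with h | h
    · exact ih lo r (by omega) (by omega) hrl h3 h4
    · have hn : lo < l.length := by omega
      rw [fmsoStop_next l ts lo hn (not_le.mpr (h3 lo (le_refl _) h))]
      exact ih (lo + 1) r (by omega) (by omega) hrl (fun i h1 h2 => h3 i (by omega) h2) h4

-- ===== VERDICT (by name: the statement is the Claim_ definition above) =====
theorem find_max_smallest_onset_spec : Claim_equal_find_max_smallest_onset := by
  intro onsets ts _ ⟨hne, hcase⟩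
  have hlen : 0 < onsets.length := List.length_pos_iff.mpr hne
  unfold Spec_find_max_smallest_onset find_max_smallest_onset find_max_smallest_onset_alt
  have heq := fmsoLoopA_eq_stop onsets ts onsets.length 1 (by omega) (le_refl _) hlen
  simp only [Nat.sub_self] at heq
  rw [heq]
  rcases hcase with hs | hlt | hge
  · obtain ⟨h1, h2, h3, h4⟩ := fmsoBisect_spec onsets ts hs onsets.length 1 onsets.length (by omega) (le_refl _) hlen (le_refl _)
    rw [fmsoStop_eq_of_spec onsets ts onsets.length 1 (fmsoBisect onsets ts 1 onsets.length)
        (by omega) h1 h2 h3 (by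
          rcases Nat.lt_or_ge (fmsoBisect onsets ts 1 onsets.length) onsets.length with h | h
          · exact Or.inr (h4 h)
          · exact Or.inl (by omega))]
  · have hall := fmso_tail_all onsets (fun x => x < ts) hlt
    rw [fmsoBisect_all_lt onsets ts onsets.length 1 onsets.length (by omega) hlen
          (fun i h1 h2 => hall i h1 h2),
        fmsoStop_eq_of_spec onsets ts onsets.length 1 onsets.length (by omega) hlen
          (le_refl _) (fun i h1 h2 => hall i h1 h2) (Or.inl rfl)]
  · have hall := fmso_tail_all onsets (fun x => ts ≤ x) hge
    rw [fmsoBisect_all_ge onsets ts onsets.length 1 onsets.length (by omega)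
          (fun i h1 h2 => hall i h1 h2),
        fmsoStop_eq_of_spec onsets ts onsets.length 1 1 (by omega) (le_refl _) hlen
          (fun i h1 h2 => by omega) (by
            rcases Nat.lt_or_ge 1 onsets.length with h | h
            · exact Or.inr (hall 1 (le_refl _) h)
            · exact Or.inl (by omega))]
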